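-- pv_equiv track=rewrite | github.com/z-fab/agentmd | agent_md/tools/memory.py | _parse_memory_file
-- ===== SOURCE A (Python) =====
-- def _parse_memory_file(content: str) -> dict[str, str]:
--     """Parse a .memory.md file into sections keyed by header name.
--
--     Each section starts with '# SECTION_NAME' and includes all content
--     until the next section header or end of file.
--     """
--     sections: dict[str, str] = {}
--     current_section = None
--     current_lines: list[str] = []
--
--     for line in content.split("\n"):
--         if line.startswith("# "):
--             # Save previous section
--             if current_section is not None:
--                 sections[current_section] = "\n".join(current_lines).strip()
--             current_section = line[2:].strip()
--             current_lines = []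
--         else:
--             current_lines.append(line)
--
--     # Save last section
--     if current_section is not None:
--         sections[current_section] = "\n".join(current_lines).strip()
--
--     return sections
-- ===== SOURCE B (Python) =====
-- def _parse_memory_file(content: str) -> dict[str, str]:
--     """Parse a .memory.md file into sections keyed by header name.
--
--     Two-pass: split into lines once, collect the indices of header lines,
--     then emit one dict entry per header from the slice up to the next header.
--     """
--     lines = content.split("\n")
--     starts = [i for i, line in enumerate(lines) if line.startswith("# ")]
--     sections: dict[str, str] = {}
--     for i, j in zip(starts, starts[1:] + [len(lines)]):
--         sections[lines[i][2:].strip()] = "\n".join(lines[i + 1:j]).strip()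
--     return sections
-- ===== Notes on version B (the rewrite author's own statement) =====
-- stated objective: alternative
-- what changed: B replaces A's stateful single scan (current_section/current_lines accumulators with an end-of-loop flush) by a two-pass index decomposition: split into lines once, collect the header-line indices, then build each section directly from the slice between consecutive header indices.
import Mathlib
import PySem

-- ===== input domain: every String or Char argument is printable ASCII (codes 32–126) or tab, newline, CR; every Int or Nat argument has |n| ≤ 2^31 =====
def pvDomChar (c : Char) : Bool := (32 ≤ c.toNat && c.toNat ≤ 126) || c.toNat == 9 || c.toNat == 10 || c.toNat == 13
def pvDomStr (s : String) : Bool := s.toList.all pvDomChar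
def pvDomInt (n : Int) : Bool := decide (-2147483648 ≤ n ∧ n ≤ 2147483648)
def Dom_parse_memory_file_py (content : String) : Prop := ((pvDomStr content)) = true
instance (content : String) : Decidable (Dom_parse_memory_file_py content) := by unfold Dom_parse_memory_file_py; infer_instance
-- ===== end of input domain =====

-- B replaces A's stateful scan (current section + accumulated lines + final flush) by a
-- two-pass decomposition: collect header-line indices, then slice between consecutive headers.

-- ===== PORT A =====
-- A's for-loop over lines with state (sections, current_section, current_lines), plus the final flush.
def pmALoop : List String → PySem.Dict String String → Option String → List String →
    PySem.Dict String String
  | [], sections, cur, acc =>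
      match cur with
      | none => sections
      | some s => sections.insert s (PySem.Str.strip (PySem.Str.join "\n" acc))
  | l :: rest, sections, cur, acc =>
      if PySem.Str.startswith l "# " then
        let sections' :=
          match cur with
          | none => sections
          | some s => sections.insert s (PySem.Str.strip (PySem.Str.join "\n" acc))
        pmALoop rest sections' (some (PySem.Str.strip (PySem.Str.slice l (some 2) none))) []
      else
        pmALoop rest sections cur (acc ++ [l])

def parse_memory_file_py (content : String) : List (String × String) :=
  (pmALoop ((PySem.Str.split? content "\n").getD []) PySem.Dict.empty none []).items

-- ===== PORT B =====
def parse_memory_file_py_alt (content : String) : List (String × String) :=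
  let lines := (PySem.Str.split? content "\n").getD []
  let starts := ((PySem.List.enumerate lines 0).filter
      (fun p => PySem.Str.startswith p.2 "# ")).map (·.1)
  ((starts.zip (starts.drop 1 ++ [(lines.length : Int)])).foldl
      (fun sections ij =>
        sections.insert
          (PySem.Str.strip (PySem.Str.slice (PySem.List.pyGetD lines ij.1 "") (some 2) none))
          (PySem.Str.strip (PySem.Str.join "\n"
            (PySem.List.slice lines (some (ij.1 + 1)) (some ij.2)))))
      PySem.Dict.empty).items

-- ===== PRECONDITION & SPEC =====
def Spec_parse_memory_file_py (content : String) (out : List (String × String)) : Prop := out = parse_memory_file_py_alt content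
instance (content : String) (out : List (String × String)) : Decidable (Spec_parse_memory_file_py content out) := by unfold Spec_parse_memory_file_py; infer_instance

-- ===== CLAIM (what is proved, stated in full; the proofs are below) =====
def Claim_equal_parse_memory_file_py : Prop := ∀ (content : String), Dom_parse_memory_file_py content → Spec_parse_memory_file_py content (parse_memory_file_py content)

-- ===== LEMMAS AND PROOFS =====

-- Nat-index header positions of a line list (proof-side mirror of B's `starts`).
def pmStartsN : List String → List Nat
  | [] => []
  | l :: ls =>
      if PySem.Str.startswith l "# " then 0 :: (pmStartsN ls).map (· + 1)
      else (pmStartsN ls).map (· + 1)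

-- Proof-side mirror of B's fold, on Nat indices with explicit look-ahead.
def pmBGo (lines : List String) : List Nat → PySem.Dict String String →
    PySem.Dict String String
  | [], d => d
  | i :: rest, d =>
      pmBGo lines rest
        (d.insert
          (PySem.Str.strip (PySem.Str.slice (lines.getD i "") (some 2) none))
          (PySem.Str.strip (PySem.Str.join "\n"
            (List.take (rest.headD lines.length - (i + 1)) (List.drop (i + 1) lines)))))

theorem pmHeadD (s : List Nat) (n : Nat) :
    (s.map (· + 1)).headD (n + 1) = s.headD n + 1 := by
  cases s <;> simp

theorem pmBGo_shift (l : String) (ls : List String) :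
    ∀ (s : List Nat) (d : PySem.Dict String String),
      pmBGo (l :: ls) (s.map (· + 1)) d = pmBGo ls s d := by
  intro s
  induction s with
  | nil => intro d; rfl
  | cons i rest ih =>
      intro d
      simp only [List.map_cons, pmBGo, List.getD_cons_succ, List.drop_succ_cons,
        List.length_cons, pmHeadD, Nat.add_sub_add_right]
      rw [ih]

theorem pmM2 (ls : List String) :
    ∀ (d : PySem.Dict String String) (s : String) (acc : List String),
      pmALoop ls d (some s) acc =
        pmBGo ls (pmStartsN ls)
          (d.insert s (PySem.Str.strip (PySem.Str.join "\n"
            (acc ++ ls.take ((pmStartsN ls).headD ls.length))))) := by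
  induction ls with
  | nil => intro d s acc; simp [pmALoop, pmBGo, pmStartsN]
  | cons l ls ih =>
      intro d s acc
      by_cases h : PySem.Str.startswith l "# "
      · simp only [pmALoop, pmStartsN, h, if_true, pmBGo, List.headD_cons,
          List.take_zero, List.append_nil, List.getD_cons_zero, List.drop_succ_cons,
          List.drop_zero, List.length_cons, pmHeadD, Nat.add_sub_cancel, Nat.zero_add]
        rw [pmBGo_shift, ih]
        simp
      · simp only [pmALoop, pmStartsN, h, Bool.false_eq_true, if_false, List.length_cons, pmHeadD]
        rw [pmBGo_shift, ih]
        simp [List.take_succ_cons]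
  
theorem pmM1 (ls : List String) :
    ∀ (d : PySem.Dict String String) (acc : List String),
      pmALoop ls d none acc = pmBGo ls (pmStartsN ls) d := by
  induction ls with
  | nil => intro d acc; rfl
  | cons l ls ih =>
      intro d acc
      by_cases h : PySem.Str.startswith l "# "
      · simp only [pmALoop, pmStartsN, h, if_true, pmBGo, 
          List.getD_cons_zero, List.drop_succ_cons, List.drop_zero,
          List.length_cons, pmHeadD, Nat.add_sub_cancel, Nat.zero_add]
        rw [pmBGo_shift, pmM2]
        simp
      · simp only [pmALoop, pmStartsN, h, Bool.false_eq_true, if_false]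
        rw [pmBGo_shift, ih]

-- B's `starts` list is the Nat header positions, cast and shifted by the enumerate start.
theorem pmStarts_cast (ls : List String) :
    ∀ (k : Int),
      ((PySem.List.enumerate ls k).filter
          (fun p => PySem.Str.startswith p.2 "# ")).map (·.1)
        = (pmStartsN ls).map (fun (n : Nat) => k + (n : Int)) := by
  induction ls with
  | nil => intro k; simp [PySem.List.enumerate_nil, pmStartsN]
  | cons l ls ih =>
      intro k
      rw [PySem.List.enumerate_cons]
      by_cases h : PySem.Str.startswith l "# "
      · simp only [List.filter_cons, h, pmStartsN, if_true, List.map_cons]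
        rw [ih (k + 1)]
        simp only [List.map_map]
        refine List.cons_eq_cons.mpr ⟨by push_cast; ring, ?_⟩
        apply List.map_congr_left; intro n _
        simp only [Function.comp_apply]; push_cast; ring
      · simp only [List.filter_cons, h, pmStartsN, Bool.false_eq_true, if_false]
        rw [ih (k + 1)]
        simp only [List.map_map]
        apply List.map_congr_left; intro n _
        simp only [Function.comp_apply]; push_cast; ring

-- B's fold over (i, j) index pairs is pmBGo, on cast indices.
theorem pmFold_eq_bGo (lines : List String) :
    ∀ (s : List Nat) (d : PySem.Dict String String),
      (((s.map (fun (n : Nat) => (n : Int))).zip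
          ((s.map (fun (n : Nat) => (n : Int))).drop 1 ++ [(lines.length : Int)])).foldl
        (fun sections ij =>
          sections.insert
            (PySem.Str.strip (PySem.Str.slice (PySem.List.pyGetD lines ij.1 "") (some 2) none))
            (PySem.Str.strip (PySem.Str.join "\n"
              (PySem.List.slice lines (some (ij.1 + 1)) (some ij.2)))))
        d)
      = pmBGo lines s d := by
  intro s
  induction s with
  | nil => intro d; rfl
  | cons i rest ih =>
      intro d
      have hzip : ((i :: rest).map (fun (n : Nat) => (n : Int))).zip
            ((((i :: rest).map (fun (n : Nat) => (n : Int))).drop 1) ++ [(lines.length : Int)])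
          = ((i : Int), ((rest.headD lines.length : Nat) : Int)) ::
            ((rest.map (fun (n : Nat) => (n : Int))).zip
              ((rest.map (fun (n : Nat) => (n : Int))).drop 1 ++ [(lines.length : Int)])) := by
        cases rest <;> simp
      rw [hzip]
      simp only [List.foldl_cons]
      rw [ih]
      have h1 : PySem.List.pyGetD lines (i : Int) "" = lines.getD i "" :=
        PySem.List.pyGetD_natCast lines i ""
      have h2 : PySem.List.slice lines (some ((i : Int) + 1))
            (some ((rest.headD lines.length : Nat) : Int))
          = List.take (rest.headD lines.length - (i + 1)) (List.drop (i + 1) lines) := by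
        rw [show ((i : Int) + 1) = ((i + 1 : Nat) : Int) by push_cast; ring]
        exact PySem.List.slice_natCast lines (i + 1) (rest.headD lines.length)
      rw [h1, h2]
      rfl

-- ===== VERDICT (by name: the statement is the Claim_ definition above) =====
theorem parse_memory_file_py_spec : Claim_equal_parse_memory_file_py := by
  unfold Claim_equal_parse_memory_file_py
  intro content _
  unfold Spec_parse_memory_file_py parse_memory_file_py parse_memory_file_py_alt
  congr 1
  rw [pmM1]
  rw [pmStarts_cast _ 0]
  have hmap : (pmStartsN ((PySem.Str.split? content "\n").getD [])).map
      (fun (n : Nat) => (0 : Int) + (n : Int))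
      = (pmStartsN ((PySem.Str.split? content "\n").getD [])).map (fun (n : Nat) => (n : Int)) := by
    apply List.map_congr_left; intro n _; ring
  rw [hmap, pmFold_eq_bGo]
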